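-- pv_equiv track=rewrite | github.com/way2arun/datastructures_algorithms | src/arrays/numSubarrayBoundedMax.py | numSubarrayBoundedMax
-- ===== SOURCE A (Python) =====
-- from typing import List
--
-- def numSubarrayBoundedMax(nums: List[int], left: int, right: int) -> int:
--     # Solution 1 - 324 ms
--     """
--     ans, low, mid = 0, 0, 0
--     for num in nums:
--         if num > right:
--             mid = 0
--         else:
--             mid += 1
--             ans += mid
--         if num >= left:
--             low = 0
--         else:
--             low += 1
--             ans -= low
--     return ans
--     """
--     # Solution 2- 300 ms
--     # We have to find the number of subarrays such that the maximum element in window is greater-equal to left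
--     # and less than equal right
--     # basically    left <= maximum_element_in_window <= right
--
--     # ---------------------------THEORY----------------------------------------------------------
--     # contiguous subarrays in this case will be added like so.
--     # if left = 2, right = 4 and array = [0, 3, 1, 2]
--     #
--     #                                   0, 3, 1, 2, 0, 5, 1, 2
--     # window_opening =>                 ^
--     # window_closing =>                          ^
--     #
--     # number of contiguous subarrays satisfying condition to have a NEEDED ELEMENT AT THE CLOSING is
--     # equal to the length of window. Because the window_ending always has to be there in the subarray
--     #
--     #                   0, 3, 1, 2
--     #                   ---------- [0, 3, 1, 2]
--     #                      -------    [3, 1, 2]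
--     #                         ----       [1, 2]
--     #                            -          [2]
--     #
--     # similarly when window closing was at 3 before this iteration
--     #
--     #
--     #                                   0, 3, 1, 2, 0, 5, 1, 2
--     # window_opening =>                 ^
--     # window_closing =>                    ^
--     #
--     # we would add the length of window with A NEEDED ELEMENT at window closing becuase we needed all the
--     # subarrays with 3 present. And A NEEDED ELEMENT IS ALWAYS AT THE END HERE. Becuase we calcualte as soon
--     # as we encounter it
--     #
--     #
--     #                   0, 3
--     #                   ---- [0, 3]
--     #                      -    [3]
--     # -----------------------------------------------------------------------------------------------------
--
--     # Classification => NEEDED ELEMENTS, numbers such that      left <= number <= right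
--     #                   OKAY ELEMENTS, numbers such that        number < left
--     #                   NOT OKAY ELEMENTS, numbers such that    number > right
--
--     # window opening
--     window_opening = 0
--
--     # result. That stores number of subarrays with bounded maximum
--     result = 0
--
--     # temp_score. Similar to backlog_counter from nice subarrays problem.
--     temp_score = 0
--
--     for index, number in enumerate(nums):
--         # if number is a NEEDED ELEMENT
--         if left <= number <= right:
--             # we set temp_score to window_length
--             temp_score = index - window_opening + 1
--
--             # we add temp_score to result
--             result += temp_score
--
--         # elif number is an OKAY ELEMENT
--         elif number < left:
--             # we add the temp_score to result
--             result += temp_score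
--
--         # else if number is a NOT OKAY ELEMENT
--         else:
--             # we set window_opening to one index after this index
--             window_opening = index + 1
--
--             # we reset temp_score to 0
--             temp_score = 0
--
--     return result
-- ===== SOURCE B (Python) =====
-- from typing import List
--
-- def numSubarrayBoundedMax(nums: List[int], left: int, right: int) -> int:
--     # Count-at-most decomposition: subarrays with max in [left, right]
--     # = (subarrays with max <= right) - (subarrays with max <= left-1).
--     if left > right:
--         return 0
--
--     def count_at_most(bound: int) -> int:
--         total = 0
--         run = 0  # length of current suffix of consecutive elements <= bound
--         for n in nums:
--             if n <= bound:
--                 run += 1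
--                 total += run
--             else:
--                 run = 0
--         return total
--
--     return count_at_most(right) - count_at_most(left - 1)
-- ===== Notes on version B (the rewrite author's own statement) =====
-- stated objective: simpler
-- what changed: Replaced the window-opening/temp_score three-branch scan by the count-at-most decomposition: one simple run-length pass count_at_most(bound), returning count_at_most(right) - count_at_most(left-1).
import Mathlib
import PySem

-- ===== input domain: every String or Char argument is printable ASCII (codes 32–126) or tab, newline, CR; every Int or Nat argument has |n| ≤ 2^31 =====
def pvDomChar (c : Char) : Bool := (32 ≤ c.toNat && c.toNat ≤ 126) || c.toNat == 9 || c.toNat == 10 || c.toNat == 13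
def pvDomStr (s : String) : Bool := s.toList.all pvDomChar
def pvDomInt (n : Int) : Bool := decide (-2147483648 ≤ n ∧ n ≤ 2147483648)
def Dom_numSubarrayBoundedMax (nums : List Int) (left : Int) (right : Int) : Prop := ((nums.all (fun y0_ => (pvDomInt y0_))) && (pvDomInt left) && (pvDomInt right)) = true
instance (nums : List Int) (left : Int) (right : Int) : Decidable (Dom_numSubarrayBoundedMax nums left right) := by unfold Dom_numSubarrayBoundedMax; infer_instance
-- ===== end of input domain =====

-- B replaces A's single window-opening/temp_score pass by the count-at-most
-- decomposition (two plain run-length passes and a subtraction): simpler code.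

-- ===== PORT A =====
-- A's loop state: (index from enumerate, window_opening, result, temp_score)
def pvStepA (left right : Int) (st : Int × Int × Int × Int) (number : Int) : Int × Int × Int × Int :=
  let i := st.1; let w := st.2.1; let r := st.2.2.1; let t := st.2.2.2
  if left ≤ number ∧ number ≤ right then (i + 1, w, r + (i - w + 1), i - w + 1)
  else if number < left then (i + 1, w, r + t, t)
  else (i + 1, i + 1, r, 0)

def numSubarrayBoundedMax (nums : List Int) (left : Int) (right : Int) : Int :=
  (nums.foldl (pvStepA left right) (0, 0, 0, 0)).2.2.1

-- ===== PORT B =====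
-- count_at_most's loop state: (run, total)
def pvStepM (bound : Int) (st : Int × Int) (n : Int) : Int × Int :=
  if n ≤ bound then (st.1 + 1, st.2 + (st.1 + 1)) else (0, st.2)

def pvCountAtMost (nums : List Int) (bound : Int) : Int :=
  (nums.foldl (pvStepM bound) (0, 0)).2

def numSubarrayBoundedMax_alt (nums : List Int) (left : Int) (right : Int) : Int :=
  if left > right then 0
  else pvCountAtMost nums right - pvCountAtMost nums (left - 1)

-- ===== PRECONDITION & SPEC =====
def Spec_numSubarrayBoundedMax (nums : List Int) (left : Int) (right : Int) (out : Int) : Prop := out = numSubarrayBoundedMax_alt nums left right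
instance (nums : List Int) (left : Int) (right : Int) (out : Int) : Decidable (Spec_numSubarrayBoundedMax nums left right out) := by unfold Spec_numSubarrayBoundedMax; infer_instance

-- ===== CLAIM (what is proved, stated in full; the proofs are below) =====
def Claim_equal_numSubarrayBoundedMax : Prop := ∀ (nums : List Int) (left : Int) (right : Int), Dom_numSubarrayBoundedMax nums left right → Spec_numSubarrayBoundedMax nums left right (numSubarrayBoundedMax nums left right)

-- ===== LEMMAS AND PROOFS =====

-- Invariant linking A's state to the two count-at-most states (needs left ≤ right):
-- kR = i - w,  t = kR - kL,  r = sR - sL.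
theorem pv_inv (left right : Int) (h : left ≤ right) :
    ∀ (nums : List Int) (i w r t kR sR kL sL : Int),
      kR = i - w → t = kR - kL → r = sR - sL →
      (nums.foldl (pvStepA left right) (i, w, r, t)).2.2.1 =
        (nums.foldl (pvStepM right) (kR, sR)).2 - (nums.foldl (pvStepM (left - 1)) (kL, sL)).2 := by
  intro nums
  induction nums with
  | nil => intro i w r t kR sR kL sL h1 h2 h3; simp [h3]
  | cons n ns ih =>
    intro i w r t kR sR kL sL h1 h2 h3
    simp only [List.foldl_cons, pvStepA, pvStepM]
    by_cases hn : left ≤ n ∧ n ≤ right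
    · rw [if_pos hn, if_pos hn.2, if_neg (by omega)]
      exact ih (i + 1) w (r + (i - w + 1)) (i - w + 1) (kR + 1) (sR + (kR + 1)) 0 sL
        (by omega) (by omega) (by omega)
    · by_cases hl : n < left
      · rw [if_neg hn, if_pos hl, if_pos (by omega), if_pos (by omega)]
        exact ih (i + 1) w (r + t) t (kR + 1) (sR + (kR + 1)) (kL + 1) (sL + (kL + 1))
          (by omega) (by omega) (by omega)
      · rw [if_neg hn, if_neg hl, if_neg (by omega), if_neg (by omega)]
        exact ih (i + 1) (i + 1) r 0 0 sR 0 sL (by omega) (by omega) (by omega)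

-- When left > right, A never takes the "needed" branch: result and temp_score stay 0.
theorem pv_empty (left right : Int) (h : right < left) :
    ∀ (nums : List Int) (i w : Int),
      (nums.foldl (pvStepA left right) (i, w, 0, 0)).2.2.1 = 0 := by
  intro nums
  induction nums with
  | nil => intro i w; simp
  | cons n ns ih =>
    intro i w
    simp only [List.foldl_cons, pvStepA]
    rw [if_neg (by omega)]
    by_cases hl : n < left
    · rw [if_pos hl]; simpa using ih (i + 1) w
    · rw [if_neg hl]; exact ih (i + 1) (i + 1)

-- ===== VERDICT (by name: the statement is the Claim_ definition above) =====
theorem numSubarrayBoundedMax_spec : Claim_equal_numSubarrayBoundedMax := by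
  intro nums left right _
  unfold Spec_numSubarrayBoundedMax numSubarrayBoundedMax numSubarrayBoundedMax_alt pvCountAtMost
  by_cases h : left > right
  · rw [if_pos h]; exact pv_empty left right h nums 0 0
  · rw [if_neg h]
    exact pv_inv left right (by omega) nums 0 0 0 0 0 0 0 0 rfl rfl rfl
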